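-- pv_equiv track=rewrite | github.com/joelyuhas/Academic-Code | Academic/Computer Science I/Lab/Lab F/pack.py | packer
-- ===== SOURCE A (Python) =====
-- def isSpaceFree( binSize, row, column, block ):
--     """
--     PreConditions: Recives the size of bin, row value, column value, and block size
--     PostConditions: outputs either False if location is not 0, returns true if location is 0
--     """
--     if ((len( binSize ) < block + row) or (len( binSize )) < block + column ):
--         return False
--     for i in range ( row, row +block ):
--         for g in range( column, column + block):
--             if binSize[i][g] != 0:
--                 return False
--     return True
--
-- def placeBlock( block, Bin, row, column):
--     """
--     PreConditions: recives block size, bin size, row and colums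
--     PostConditions: fills designated row and colom areas with number corresponding to size of box
--     """
--     for r in range(row, row+block):
--         for c in range(column, column+block):
--             Bin[r][c] = block
--     return Bin
--
-- def tryPacker( Bin, block ):
--     """
--     PreConditions: recives bin and list of blocks
--     PostConditions: returns ture if block is packed, returns false if block is not packed
--     """
--     for row in range(len(Bin)):
--         for column in range(len(Bin)):
--             if isSpaceFree(Bin, row, column, block ) == True:
--                 placeBlock( block, Bin, row, column)
--                 return True
--     return False
--
-- def packer( Bin, blockList):
--     """
--     PreConditions: recives bin and list of blocks
--     PostConditions: uses trypacker to pack list full of boxes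
--     """
--     unUsed = []
--     for block in blockList:
--         if tryPacker(Bin, block) == True:
--             pass
--         else:
--             unUsed.append(block)
--     return Bin
-- ===== SOURCE B (Python) =====
-- # B: greedy first-fit, but the per-position block x block rescans of A are replaced by
-- # zero-run dynamic programming: per row the length of the zero run starting at each cell,
-- # then per column the run of rows whose horizontal zero run is >= block, so each candidate
-- # position is tested in O(1).  B is purely functional: it returns a new grid and does not
-- # mutate Bin (A mutates Bin in place); the return value is the same.
-- def _zrow(row):
--     # z[c] = number of consecutive zeros in row starting at c
--     z = []
--     run = 0
--     for v in reversed(row):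
--         run = run + 1 if v == 0 else 0
--         z.append(run)
--     z.reverse()
--     return z
--
-- def _vruns(Z, block):
--     # V[r][c] = number of consecutive rows starting at r with Z[r'][c] >= block
--     V = []
--     prev = []
--     for zr in reversed(Z):
--         prev = [p + 1 if z >= block else 0 for z, p in zip(zr, prev)] if V else \
--                [1 if z >= block else 0 for z in zr]
--         V.append(prev)
--     V.reverse()
--     return V
--
-- def packer(Bin, blockList):
--     n = len(Bin)
--     grid = [row[:] for row in Bin]
--     for block in blockList:
--         if block < 1 or block > n:
--             continue  # occupies nothing / can never fit
--         Z = [_zrow(row[:n]) for row in grid]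
--         V = _vruns(Z, block)
--         pos = next(((r, c) for r in range(n - block + 1)
--                     for c in range(n - block + 1) if V[r][c] >= block), None)
--         if pos is not None:
--             r0, c0 = pos
--             grid = [row[:c0] + [block] * block + row[c0 + block:]
--                     if r0 <= r < r0 + block else row
--                     for r, row in enumerate(grid)]
--     return grid
-- ===== Notes on version B (the rewrite author's own statement) =====
-- stated objective: faster
-- what changed: A rescans the block x block cell region for every candidate position (and rescans rows per cell); B precomputes per-row zero-run lengths and a per-column vertical-run table after each placement, so each candidate position is tested in O(1), and B builds the result grid functionally instead of mutating Bin in place.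
-- outside the precondition, e.g. on packer([[0, 1], [1]], [1]): A returns [[1, 1], [1]], B returns [[1, 1], [1]]
import Mathlib
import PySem

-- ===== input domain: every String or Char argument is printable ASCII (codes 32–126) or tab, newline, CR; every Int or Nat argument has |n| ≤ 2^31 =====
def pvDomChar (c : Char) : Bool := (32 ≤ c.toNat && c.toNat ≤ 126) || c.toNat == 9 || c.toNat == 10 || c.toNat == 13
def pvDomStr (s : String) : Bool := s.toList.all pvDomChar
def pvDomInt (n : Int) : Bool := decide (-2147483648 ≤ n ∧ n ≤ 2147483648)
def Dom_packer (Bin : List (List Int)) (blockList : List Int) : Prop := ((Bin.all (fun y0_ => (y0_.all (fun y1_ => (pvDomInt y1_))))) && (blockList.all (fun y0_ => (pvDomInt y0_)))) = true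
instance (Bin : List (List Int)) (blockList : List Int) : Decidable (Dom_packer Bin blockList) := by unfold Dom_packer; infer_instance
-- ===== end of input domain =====

-- B replaces A's per-position block×block rescans by zero-run DP tables (O(1) per candidate).
-- NOTE on side effects: the Python A mutates Bin in place and returns it; the Python B builds
-- a fresh grid and does not mutate its argument — the equivalence proved here is about the
-- RETURN value only.

-- ===== PORT A =====
def isSpaceFree (binSize : List (List Int)) (row column block : Int) : Bool :=
  if (binSize.length : Int) < block + row ∨ (binSize.length : Int) < block + column then false
  else (PySem.List.pyRange row (row + block) 1).all (fun i =>
        (PySem.List.pyRange column (column + block) 1).all (fun g =>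
          PySem.List.pyGetD (PySem.List.pyGetD binSize i []) g 0 == 0))

def placeBlock (block : Int) (Bin : List (List Int)) (row column : Int) : List (List Int) :=
  (PySem.List.pyRange row (row + block) 1).foldl (fun B r =>
    (PySem.List.pyRange column (column + block) 1).foldl (fun B c =>
      PySem.List.pySetD B r (PySem.List.pySetD (PySem.List.pyGetD B r []) c block)) B) Bin

def tryPacker (Bin : List (List Int)) (block : Int) : Bool × List (List Int) :=
  match (PySem.List.pyRange 0 (PySem.List.len Bin) 1).findSome? (fun row =>
          (PySem.List.pyRange 0 (PySem.List.len Bin) 1).findSome? (fun col =>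
            if isSpaceFree Bin row col block then some (row, col) else none)) with
  | some (row, col) => (true, placeBlock block Bin row col)
  | none => (false, Bin)

def packer (Bin : List (List Int)) (blockList : List Int) : List (List Int) :=
  (blockList.foldl (fun (st : List (List Int) × List Int) block =>
      let r := tryPacker st.1 block
      if r.1 then (r.2, st.2) else (r.2, st.2 ++ [block]))
    (Bin, ([] : List Int))).1

-- ===== PORT B =====
-- z[c] = number of consecutive zeros in the row starting at c (Source B builds it right-to-left;
-- this recursion performs the same right-to-left run accumulation)
def zrow : List Int → List Int
  | [] => []
  | v :: rest =>
      let zs := zrow rest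
      (if v = 0 then zs.headD 0 + 1 else 0) :: zs

-- V[r][c] = number of consecutive rows starting at r whose horizontal zero run at c is ≥ block
def vruns (block : Int) : List (List Int) → List (List Int)
  | [] => []
  | zr :: rest =>
      match vruns block rest with
      | [] => [zr.map (fun z => if block ≤ z then (1 : Int) else 0)]
      | prev :: V => (List.zipWith (fun z p => if block ≤ z then p + 1 else 0) zr prev) :: prev :: V

-- first (r, c) in row-major order with V[r][c] ≥ block  (Source B's next(...) over the generator)
def findPos (V : List (List Int)) (n b : Nat) (block : Int) : Option (Nat × Nat) :=
  (List.range (n - b + 1)).findSome? (fun r =>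
    (List.range (n - b + 1)).findSome? (fun c =>
      if block ≤ (V.getD r []).getD c 0 then some (r, c) else none))

-- body of Source B's per-block loop
def altStep (n : Nat) (grid : List (List Int)) (block : Int) : List (List Int) :=
  if block < 1 ∨ (n : Int) < block then grid
  else
    let b := block.toNat
    let Z := grid.map (fun row => zrow (row.take n))
    let V := vruns block Z
    match findPos V n b block with
    | none => grid
    | some (r0, c0) =>
        grid.mapIdx (fun r row =>
          if r0 ≤ r ∧ r < r0 + b then
            row.take c0 ++ List.replicate b block ++ row.drop (c0 + b)
          else row)

-- Source B's 'grid = [row[:] for row in Bin]' copies rows; on values it is the identity, so the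
-- fold starts from Bin itself.
def packer_alt (Bin : List (List Int)) (blockList : List Int) : List (List Int) :=
  blockList.foldl (altStep Bin.length) Bin

-- ===== PRECONDITION & SPEC =====
-- Pre_ excludes ragged bins (some row shorter than the number of rows) when some block size in
-- (0, len(Bin)] makes A scan cells: there A's column scan over range(len(Bin)) can raise
-- IndexError.
def Pre_packer (Bin : List (List Int)) (blockList : List Int) : Prop :=
  (∀ row ∈ Bin, Bin.length ≤ row.length) ∨ (∀ b ∈ blockList, b ≤ 0 ∨ (Bin.length : Int) < b)
instance (Bin : List (List Int)) (blockList : List Int) : Decidable (Pre_packer Bin blockList) := by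
  unfold Pre_packer; infer_instance

def pvWitness_packer : List (List Int) × List Int := ([[0, 0], [0, 1]], [1, 2, 1])

def Spec_packer (Bin : List (List Int)) (blockList : List Int) (out : List (List Int)) : Prop := out = packer_alt Bin blockList
instance (Bin : List (List Int)) (blockList : List Int) (out : List (List Int)) : Decidable (Spec_packer Bin blockList out) := by unfold Spec_packer; infer_instance

-- ===== CLAIM (what is proved, stated in full; the proofs are below) =====
def Claim_equal_packer : Prop := ∀ (Bin : List (List Int)) (blockList : List Int), Dom_packer Bin blockList → Pre_packer Bin blockList → Spec_packer Bin blockList (packer Bin blockList)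

-- ===== LEMMAS AND PROOFS =====

-- proof-only helpers
def FreeCells (grid : List (List Int)) (r c b : Nat) : Prop :=
  ∀ i < b, ∀ j < b, (grid.getD (r + i) []).getD (c + j) 1 = 0

def GridInv (n : Nat) (grid : List (List Int)) : Prop :=
  grid.length = n ∧ ∀ row ∈ grid, n ≤ row.length

theorem zrow_length (xs : List Int) : (zrow xs).length = xs.length := by
  induction xs with
  | nil => rfl
  | cons v rest ih => simp [zrow, ih]

theorem zrow_nonneg (xs : List Int) : ∀ x ∈ zrow xs, 0 ≤ x := by
  induction xs with
  | nil => simp [zrow]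
  | cons v rest ih =>
      intro x hx
      simp only [zrow, List.mem_cons] at hx
      rcases hx with h | h
      · subst h
        split
        · cases hz : zrow rest with
          | nil => simp
          | cons a t =>
              have := ih a (by rw [hz]; simp)
              simp; omega
        · omega
      · exact ih x h

theorem zrow_ge (xs : List Int) (c k : Nat) (h : c + k ≤ xs.length) :
    ((k : Int) ≤ (zrow xs).getD c 0) ↔ ∀ j < k, xs.getD (c + j) 1 = 0 := by
  induction xs generalizing c k with
  | nil =>
      simp only [List.length_nil, Nat.le_zero, Nat.add_eq_zero] at h
      simp [zrow, h.1, h.2]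
  | cons v rest ih =>
      cases c with
      | succ c' =>
          have hiff := ih c' k (by simp at h; omega)
          have hL : (zrow (v :: rest)).getD (c' + 1) 0 = (zrow rest).getD c' 0 := by
            simp [zrow]
          rw [hL, hiff]
          constructor
          · intro hall j hj
            rw [show c' + 1 + j = (c' + j) + 1 by omega, List.getD_cons_succ]
            exact hall j hj
          · intro hall j hj
            have := hall j hj
            rw [show c' + 1 + j = (c' + j) + 1 by omega, List.getD_cons_succ] at this
            exact this
      | zero =>
          cases k with
          | zero =>
              simp only [Nat.cast_zero]
              constructor
              · intro _ j hj; omega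
              · intro _
                simp only [zrow, List.getD_cons_zero]
                split
                · cases hz : zrow rest with
                  | nil => simp
                  | cons a t =>
                      have := zrow_nonneg rest a (by rw [hz]; simp)
                      simp; omega
                · omega
          | succ k' =>
              simp only [zrow, List.getD_cons_zero]
              by_cases hv : v = 0
              · have hhead : (zrow rest).headD 0 = (zrow rest).getD 0 0 := by
                  cases zrow rest <;> simp
                rw [if_pos hv, hhead]
                have hiff := ih 0 k' (by simp at h; omega)
                constructor
                · intro hle j hj
                  cases j with
                  | zero => simpa [hv] using hv
                  | succ j' =>
                      have hk : (k' : Int) ≤ (zrow rest).getD 0 0 := by push_cast at hle ⊢; omega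
                      have h2 := hiff.mp hk j' (by omega)
                      simpa using h2
                · intro hall
                  have h3 : ∀ j < k', rest.getD (0 + j) 1 = 0 := by
                    intro j hj; simpa using hall (j+1) (by omega)
                  have h4 := hiff.mpr h3
                  push_cast at h4 ⊢; omega
              · rw [if_neg hv]
                constructor
                · intro hle; exfalso; push_cast at hle; omega
                · intro hall
                  exfalso
                  have := hall 0 (by omega)
                  simp at this; exact hv this

theorem vruns_cons (block : Int) (zr : List Int) (rest : List (List Int)) :
    vruns block (zr :: rest) =
      (match vruns block rest with
       | [] => zr.map (fun z => if block ≤ z then (1 : Int) else 0)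
       | prev :: _ => List.zipWith (fun z p => if block ≤ z then p + 1 else 0) zr prev)
        :: vruns block rest := by
  cases h : vruns block rest <;> simp [vruns, h]

theorem vruns_length (block : Int) (Z : List (List Int)) :
    (vruns block Z).length = Z.length := by
  induction Z with
  | nil => rfl
  | cons zr rest ih => rw [vruns_cons]; simp [ih]

theorem vruns_rows_len (block : Int) (n : Nat) (Z : List (List Int))
    (h : ∀ zr ∈ Z, zr.length = n) : ∀ vr ∈ vruns block Z, vr.length = n := by
  induction Z with
  | nil => simp [vruns]
  | cons zr rest ih =>
      intro vr hvr
      rw [vruns_cons] at hvr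
      rcases List.mem_cons.mp hvr with hh | ht
      · subst hh
        cases hv : vruns block rest with
        | nil => simp [hv, h zr (by simp)]
        | cons prev V =>
            have hp : prev.length = n := ih (fun z hz => h z (by simp [hz])) prev (by simp [hv])
            simp [hv, h zr (by simp), hp]
      · exact ih (fun z hz => h z (by simp [hz])) vr ht

theorem vruns_nonneg (block : Int) (Z : List (List Int)) :
    ∀ vr ∈ vruns block Z, ∀ x ∈ vr, 0 ≤ x := by
  induction Z with
  | nil => simp [vruns]
  | cons zr rest ih =>
      intro vr hvr x hx
      rw [vruns_cons] at hvr
      rcases List.mem_cons.mp hvr with hh | ht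
      · subst hh
        cases hv : vruns block rest with
        | nil =>
            simp only [hv] at hx
            rcases List.mem_map.mp hx with ⟨z, _, hz⟩
            rw [← hz]; split <;> omega
        | cons prev V =>
            simp only [hv] at hx
            rcases List.mem_iff_getElem.mp hx with ⟨i, hi, hz⟩
            rw [List.getElem_zipWith] at hz
            rw [← hz]
            split
            · have : prev[i]'(by simp at hi; omega) ∈ prev := List.getElem_mem _
              have := ih prev (by simp [hv]) _ this
              omega
            · omega
      · exact ih vr ht x hx

theorem vruns_ge (block : Int) (n : Nat) (Z : List (List Int))
    (hZ : ∀ zr ∈ Z, zr.length = n) (r k c : Nat) (hr : r + k ≤ Z.length) (hc : c < n) :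
    ((k : Int) ≤ ((vruns block Z).getD r []).getD c 0) ↔
      ∀ i < k, block ≤ (Z.getD (r + i) []).getD c 0 := by
  induction Z generalizing r k with
  | nil =>
      simp only [List.length_nil, Nat.le_zero, Nat.add_eq_zero] at hr
      simp [vruns, hr.1, hr.2]
  | cons zr rest ih =>
      have hZr : ∀ z ∈ rest, z.length = n := fun z hz => hZ z (by simp [hz])
      cases r with
      | succ r' =>
          rw [vruns_cons]
          simp only [List.getD_cons_succ]
          rw [ih hZr r' k (by simp at hr; omega)]
          constructor
          · intro hall i hi
            rw [show r' + 1 + i = (r' + i) + 1 by omega, List.getD_cons_succ]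
            exact hall i hi
          · intro hall i hi
            have := hall i hi
            rw [show r' + 1 + i = (r' + i) + 1 by omega, List.getD_cons_succ] at this
            exact this
      | zero =>
          cases k with
          | zero =>
              simp only [Nat.cast_zero]
              constructor
              · intro _ i hi; omega
              · intro _
                rw [vruns_cons]
                simp only [List.getD_cons_zero]
                set row := (match vruns block rest with
                  | [] => zr.map (fun z => if block ≤ z then (1 : Int) else 0)
                  | prev :: _ => List.zipWith (fun z p => if block ≤ z then p + 1 else 0) zr prev) with hrow
                by_cases hcl : c < row.length
                · have hmem : row.getD c 0 ∈ row := by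
                    rw [List.getD_eq_getElem _ _ hcl]; exact List.getElem_mem _
                  have : row ∈ vruns block (zr :: rest) := by
                    rw [vruns_cons, ← hrow]; exact List.mem_cons_self
                  exact vruns_nonneg block (zr :: rest) row this _ hmem
                · rw [List.getD_eq_default _ _ (by omega)]
          | succ k' =>
              rw [vruns_cons]
              simp only [List.getD_cons_zero]
              have hzrl : zr.length = n := hZ zr (by simp)
              cases hv : vruns block rest with
              | nil =>
                  simp only [hv]
                  have hrl : rest.length = 0 := by
                    have := vruns_length block rest; rw [hv] at this; simpa using this.symm
                  have hk0 : k' = 0 := by simp [hrl] at hr; omega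
                  subst hk0
                  have hc' : c < zr.length := by omega
                  rw [List.getD_eq_getElem _ _ (by simpa using hc'), List.getElem_map]
                  constructor
                  · intro hle i hi
                    have hi0 : i = 0 := by omega
                    subst hi0
                    simp only [Nat.add_zero, List.getD_cons_zero]
                    by_contra hnot
                    rw [if_neg (by rw [List.getD_eq_getElem _ _ hc'] at hnot; exact hnot)] at hle
                    omega
                  · intro hall
                    have := hall 0 (by omega)
                    simp only [Nat.add_zero, List.getD_cons_zero] at this
                    rw [if_pos (by rw [List.getD_eq_getElem _ _ hc'] at this; exact this)]
                    omega
              | cons prev V =>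
                  simp only [hv]
                  have hpl : prev.length = n := vruns_rows_len block n rest hZr prev (by simp [hv])
                  have hzl : (List.zipWith (fun z p => if block ≤ z then p + 1 else 0) zr prev).length = n := by
                    simp [hzrl, hpl]
                  have hcz : c < n := hc
                  rw [List.getD_eq_getElem _ _ (by omega), List.getElem_zipWith]
                  have hprev : prev = (vruns block rest).getD 0 [] := by simp [hv]
                  have hiff := ih hZr 0 k' (by simp at hr ⊢; omega)
                  simp only [Nat.zero_add] at hiff
                  by_cases hfirst : block ≤ zr[c]'(by omega)
                  · rw [if_pos hfirst]
                    constructor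
                    · intro hle i hi
                      cases i with
                      | zero =>
                          simp only [Nat.add_zero, List.getD_cons_zero]
                          rw [List.getD_eq_getElem _ _ (by omega)]
                          exact hfirst
                      | succ i' =>
                          have hk : (k' : Int) ≤ ((vruns block rest).getD 0 []).getD c 0 := by
                            rw [← hprev]
                            have : prev.getD c 0 = prev[c]'(by omega) := List.getD_eq_getElem _ _ (by omega)
                            rw [this] at *
                            push_cast at hle ⊢
                            omega
                          have := hiff.mp hk i' (by omega)
                          rw [show 0 + (i' + 1) = i' + 1 by omega, List.getD_cons_succ]
                          simpa using this
                    · intro hall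
                      have h3 : ∀ i < k', block ≤ (rest.getD i []).getD c 0 := by
                        intro i hi
                        have := hall (i + 1) (by omega)
                        rw [show 0 + (i + 1) = i + 1 by omega, List.getD_cons_succ] at this
                        simpa using this
                      have h4 := hiff.mpr h3
                      rw [← hprev] at h4
                      have : prev.getD c 0 = prev[c]'(by omega) := List.getD_eq_getElem _ _ (by omega)
                      rw [this] at h4
                      push_cast
                      omega
                  · rw [if_neg hfirst]
                    constructor
                    · intro hle; exfalso; push_cast at hle; omega
                    · intro hall
                      exfalso
                      have := hall 0 (by omega)
                      simp only [Nat.add_zero, List.getD_cons_zero] at this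
                      rw [List.getD_eq_getElem _ _ (by omega)] at this
                      exact hfirst this

theorem isSpaceFree_iff (grid : List (List Int)) (block : Int) (hb : 1 ≤ block)
    (hrow : ∀ row ∈ grid, grid.length ≤ row.length) (r c : Nat) :
    (isSpaceFree grid r c block = true) ↔
      (r + block.toNat ≤ grid.length ∧ c + block.toNat ≤ grid.length ∧
        FreeCells grid r c block.toNat) := by
  have hbt : (block.toNat : Int) = block := Int.toNat_of_nonneg (by omega)
  unfold isSpaceFree
  by_cases hbound : (grid.length : Int) < block + (r : Int) ∨ (grid.length : Int) < block + (c : Int)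
  · rw [if_pos hbound]
    simp only [Bool.false_eq_true, false_iff]
    intro ⟨h1, h2, _⟩
    rcases hbound with h | h <;> omega
  · rw [if_neg hbound]
    push_neg at hbound
    obtain ⟨h1, h2⟩ := hbound
    rw [List.all_eq_true]
    constructor
    · intro hall
      refine ⟨by omega, by omega, ?_⟩
      intro i hi j hj
      have hmem : ((r + i : Nat) : Int) ∈ PySem.List.pyRange (r : Int) ((r : Int) + block) 1 := by
        rw [PySem.List.mem_pyRange_one]; push_cast; omega
      have hinner := hall _ hmem
      rw [List.all_eq_true] at hinner
      have hmem2 : ((c + j : Nat) : Int) ∈ PySem.List.pyRange (c : Int) ((c : Int) + block) 1 := by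
        rw [PySem.List.mem_pyRange_one]; push_cast; omega
      have := hinner _ hmem2
      simp only [PySem.List.pyGetD_natCast, beq_iff_eq] at this
      -- this : (grid.getD (r+i) []).getD (c+j) 0 = 0 ; need default 1 version
      have hrl : r + i < grid.length := by omega
      have hcl : c + j < (grid.getD (r + i) []).length := by
        have : grid.getD (r + i) [] ∈ grid := by
          rw [List.getD_eq_getElem _ _ hrl]; exact List.getElem_mem _
        have := hrow _ this
        omega
      rw [List.getD_eq_getElem _ _ hcl] at this ⊢
      exact this
    · rintro ⟨hr', hc', hfree⟩ x hx
      rw [PySem.List.mem_pyRange_one] at hx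
      rw [List.all_eq_true]
      intro y hy
      rw [PySem.List.mem_pyRange_one] at hy
      have hxeq : x = ((r + (x - r).toNat : Nat) : Int) := by push_cast; omega
      have hyeq : y = ((c + (y - c).toNat : Nat) : Int) := by push_cast; omega
      rw [hxeq, hyeq]
      simp only [PySem.List.pyGetD_natCast, beq_iff_eq]
      have hi : (x - r).toNat < block.toNat := by omega
      have hj : (y - c).toNat < block.toNat := by omega
      have := hfree _ hi _ hj
      have hrl : r + (x - r).toNat < grid.length := by omega
      have hcl : c + (y - c).toNat < (grid.getD (r + (x - r).toNat) []).length := by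
        have hm : grid.getD (r + (x - r).toNat) [] ∈ grid := by
          rw [List.getD_eq_getElem _ _ hrl]; exact List.getElem_mem _
        have := hrow _ hm
        omega
      rw [List.getD_eq_getElem _ _ hcl] at this ⊢
      exact this
theorem free_iff_V (n : Nat) (grid : List (List Int)) (block : Int) (hinv : GridInv n grid)
    (hb : 1 ≤ block) (hbn : block ≤ (n : Int)) (r c : Nat)
    (hr : r + block.toNat ≤ n) (hc : c + block.toNat ≤ n) :
    (block ≤ ((vruns block (grid.map (fun row => zrow (row.take n)))).getD r []).getD c 0) ↔
      FreeCells grid r c block.toNat := by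
  obtain ⟨hlen, hrows⟩ := hinv
  set b := block.toNat with hbdef
  have hbt : (b : Int) = block := Int.toNat_of_nonneg (by omega)
  set Z := grid.map (fun row => zrow (row.take n)) with hZdef
  have hZ : ∀ zr ∈ Z, zr.length = n := by
    intro zr hzr
    rw [hZdef, List.mem_map] at hzr
    obtain ⟨row, hrow, hmap⟩ := hzr
    rw [← hmap, zrow_length, List.length_take]
    have := hrows row hrow
    omega
  have hZlen : Z.length = n := by rw [hZdef, List.length_map, hlen]
  have hb1 : 1 ≤ b := by omega
  rw [← hbt, vruns_ge ((b : Nat) : Int) n Z hZ r b c (by omega) (by omega)]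
  simp only [hbt]
  unfold FreeCells
  have hstep : ∀ i < b, ((block ≤ (Z.getD (r + i) []).getD c 0) ↔
      ∀ j < b, (grid.getD (r + i) []).getD (c + j) 1 = 0) := by
    intro i hi
    have hri : r + i < grid.length := by omega
    have hZgetD : Z.getD (r + i) [] = zrow ((grid.getD (r + i) []).take n) := by
      rw [hZdef, List.getD_eq_getElem _ _ (by rw [List.length_map]; omega), List.getElem_map,
        List.getD_eq_getElem _ _ hri]
    have hrowlen : n ≤ (grid.getD (r + i) []).length := by
      apply hrows
      rw [List.getD_eq_getElem _ _ hri]; exact List.getElem_mem _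
    have htl : ((grid.getD (r + i) []).take n).length = n := by
      rw [List.length_take]; omega
    rw [hZgetD, ← hbt, zrow_ge _ c b (by omega)]
    constructor
    · intro h j hj
      have := h j hj
      rw [List.getD_eq_getElem _ _ (by omega), List.getElem_take] at this
      rw [List.getD_eq_getElem _ _ (by omega)]
      exact this
    · intro h j hj
      have := h j hj
      rw [List.getD_eq_getElem _ _ (by omega)] at this
      rw [List.getD_eq_getElem _ _ (by omega), List.getElem_take]
      exact this
  constructor
  · intro h i hi
    exact (hstep i hi).mp (h i hi)
  · intro h i hi
    exact (hstep i hi).mpr (h i hi)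
theorem map_findSome? {α β γ : Type} (l : List α) (f : α → Option β) (g : β → γ) :
    (l.findSome? f).map g = l.findSome? (fun x => (f x).map g) := by
  induction l with
  | nil => rfl
  | cons x xs ih =>
      rw [List.findSome?_cons, List.findSome?_cons]
      cases f x <;> simp [ih]
theorem findSome?_congr_mem {α β : Type} (l : List α) (f g : α → Option β)
    (h : ∀ x ∈ l, f x = g x) : l.findSome? f = l.findSome? g := by
  induction l with
  | nil => rfl
  | cons x xs ih =>
      rw [List.findSome?_cons, List.findSome?_cons, h x (by simp)]
      cases g x <;> simp [ih (fun y hy => h y (by simp [hy]))]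
theorem tryPacker_skip (grid : List (List Int)) (block : Int)
    (h : block ≤ 0 ∨ (grid.length : Int) < block) : (tryPacker grid block).2 = grid := by
  unfold tryPacker
  rcases h with h | h
  · by_cases hg : grid = []
    · subst hg
      simp [PySem.List.len, PySem.List.pyRange_one_eq_nil]
    · have hlen : 0 < grid.length := List.length_pos_iff.mpr hg
      have hfree : isSpaceFree grid 0 0 block = true := by
        unfold isSpaceFree
        rw [if_neg (by simp only [add_zero]; omega)]
        rw [PySem.List.pyRange_one_eq_nil (by omega)]
        rfl
      rw [PySem.List.pyRange_one_cons (show (0:Int) < PySem.List.len grid by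
        simp only [PySem.List.len_eq]; omega)]
      simp only [List.findSome?_cons, hfree, if_true]
      unfold placeBlock
      rw [PySem.List.pyRange_one_eq_nil (by omega)]
      rfl
  · -- block > len : isSpaceFree is always false
    have hnone : ∀ f : Int × Int → Bool × List (List Int), True := fun _ => trivial
    rw [List.findSome?_eq_none_iff.mpr ?_]
    intro row hrow
    rw [List.findSome?_eq_none_iff]
    intro col _
    rw [PySem.List.mem_pyRange_one] at hrow
    rw [if_neg ?_]
    unfold isSpaceFree
    rw [if_pos]
    · simp
    · left; simp [PySem.List.len_eq] at hrow ⊢; omega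
theorem inner_commute (block : Int) (cols : List Int) (B : List (List Int)) (r : Int)
    (hr : 0 ≤ r) :
    cols.foldl (fun B c =>
        PySem.List.pySetD B r (PySem.List.pySetD (PySem.List.pyGetD B r []) c block)) B
      = PySem.List.pySetD B r
          (cols.foldl (fun row c => PySem.List.pySetD row c block) (PySem.List.pyGetD B r [])) := by
  induction cols generalizing B with
  | nil =>
      simp only [List.foldl_nil]
      symm
      by_cases hin : r.toNat < B.length
      · rw [PySem.List.pySetD_of_nonneg _ _ hr, PySem.List.pyGetD_eq_getElem _ _ hr (by
          omega)]
        exact List.set_getElem_self (by omega)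
      · rw [PySem.List.pySetD_of_nonneg _ _ hr, List.set_eq_of_length_le (by omega)]
  | cons c cs ih =>
      simp only [List.foldl_cons]
      rw [ih]
      by_cases hin : r.toNat < B.length
      · have hget : PySem.List.pyGetD
            (PySem.List.pySetD B r (PySem.List.pySetD (PySem.List.pyGetD B r []) c block)) r []
            = PySem.List.pySetD (PySem.List.pyGetD B r []) c block := by
          rw [PySem.List.pySetD_of_nonneg _ _ hr,
            PySem.List.pyGetD_eq_getElem _ _ hr (by
              simp only [List.length_set]; omega),
            List.getElem_set_self (by simpa using hin)]
        rw [hget, PySem.List.pySetD_of_nonneg _ _ hr, PySem.List.pySetD_of_nonneg _ _ hr,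
          PySem.List.pySetD_of_nonneg _ _ hr, List.set_set]
      · have hid : ∀ v, PySem.List.pySetD B r v = B := by
          intro v
          rw [PySem.List.pySetD_of_nonneg _ _ hr, List.set_eq_of_length_le (by omega)]
        rw [hid, hid, hid]
theorem rowfold_splice (block : Int) (b c0 : Nat) (row : List Int) (h : c0 + b ≤ row.length) :
    (PySem.List.pyRange (c0 : Int) ((c0 : Int) + (b : Int)) 1).foldl
        (fun row c => PySem.List.pySetD row c block) row
      = row.take c0 ++ List.replicate b block ++ row.drop (c0 + b) := by
  induction b generalizing row with
  | zero =>
      rw [show ((c0:Int) + (0:Nat) : Int) = (c0:Int) by push_cast; ring,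
        PySem.List.pyRange_one_eq_nil (by omega)]
      simp
  | succ b' ih =>
      rw [show ((c0:Int) + ((b'+1 : Nat)) : Int) = ((c0:Int) + (b':Int)) + 1 by push_cast; ring,
        PySem.List.pyRange_one_succ_right (by omega), List.foldl_append]
      rw [ih row (by omega)]
      simp only [List.foldl_cons, List.foldl_nil]
      rw [show ((c0:Int) + (b':Int)) = ((c0 + b' : Nat) : Int) by push_cast; ring,
        PySem.List.pySetD_natCast]
      rw [List.append_assoc, List.set_append_right _ _ (by simp)]
      have htake : (row.take c0).length = c0 := by simp; omega
      rw [htake, show c0 + b' - c0 = b' by omega,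
        List.set_append_right _ _ (by simp),
        List.length_replicate, show b' - b' = 0 by omega,
        List.drop_eq_getElem_cons (by omega), List.set_cons_zero]
      simp [List.replicate_succ', List.append_assoc, show c0 + (b' + 1) = c0 + b' + 1 by omega]
theorem outer_mapIdx (newRow : List Int → List Int) (b r0 : Nat) (grid : List (List Int))
    (h : r0 + b ≤ grid.length) :
    (PySem.List.pyRange (r0 : Int) ((r0 : Int) + (b : Int)) 1).foldl
        (fun B r => PySem.List.pySetD B r (newRow (PySem.List.pyGetD B r []))) grid
      = grid.mapIdx (fun r row => if r0 ≤ r ∧ r < r0 + b then newRow row else row) := by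
  induction b generalizing grid with
  | zero =>
      rw [show ((r0:Int) + ((0:Nat):Int)) = (r0:Int) by push_cast; ring,
        PySem.List.pyRange_one_eq_nil (by omega), List.foldl_nil]
      apply List.ext_getElem (by simp)
      intro j hj hj2
      rw [List.getElem_mapIdx]
      rw [if_neg (by omega)]
  | succ b' ih =>
      rw [show ((r0:Int) + ((b'+1 : Nat)) : Int) = ((r0:Int) + (b':Int)) + 1 by push_cast; ring,
        PySem.List.pyRange_one_succ_right (by omega), List.foldl_append,
        ih grid (by omega)]
      simp only [List.foldl_cons, List.foldl_nil]
      have hrb : r0 + b' < grid.length := by omega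
      have hget : PySem.List.pyGetD
          (grid.mapIdx (fun r row => if r0 ≤ r ∧ r < r0 + b' then newRow row else row))
          ((r0:Int) + (b':Int)) [] = grid[r0 + b'] := by
        rw [show ((r0:Int) + (b':Int)) = ((r0 + b' : Nat) : Int) by push_cast; ring,
          PySem.List.pyGetD_natCast, List.getD_eq_getElem _ _ (by simp; omega)]
        simp only [List.getElem_mapIdx]
        rw [if_neg (by omega)]
      rw [hget, show ((r0:Int) + (b':Int)) = ((r0 + b' : Nat) : Int) by push_cast; ring,
        PySem.List.pySetD_natCast]
      apply List.ext_getElem (by simp)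
      intro j hj hj2
      simp only [List.getElem_set, List.getElem_mapIdx]
      by_cases hjeq : r0 + b' = j
      · subst hjeq; rw [if_pos rfl, if_pos (by omega)]
      · rw [if_neg hjeq]
        by_cases hcond : r0 ≤ j ∧ j < r0 + b'
        · rw [if_pos hcond, if_pos (by omega)]
        · rw [if_neg hcond, if_neg (by omega)]
theorem placeBlock_eq (block : Int) (b : Nat) (hb : (b : Int) = block)
    (grid : List (List Int)) (r0 c0 : Nat) (hr : r0 + b ≤ grid.length)
    (hc : ∀ row ∈ grid, c0 + b ≤ row.length) :
    placeBlock block grid (r0 : Int) (c0 : Int)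
      = grid.mapIdx (fun r row => if r0 ≤ r ∧ r < r0 + b then
          row.take c0 ++ List.replicate b block ++ row.drop (c0 + b) else row) := by
  unfold placeBlock
  rw [← hb]
  have hcongr : ∀ (B : List (List Int)), ∀ r ∈ PySem.List.pyRange (r0:Int) ((r0:Int) + (b:Int)) 1,
      (PySem.List.pyRange (c0:Int) ((c0:Int) + (b:Int)) 1).foldl (fun B c =>
          PySem.List.pySetD B r (PySem.List.pySetD (PySem.List.pyGetD B r []) c (b:Int))) B
        = PySem.List.pySetD B r
            ((PySem.List.pyRange (c0:Int) ((c0:Int) + (b:Int)) 1).foldl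
              (fun row c => PySem.List.pySetD row c (b:Int)) (PySem.List.pyGetD B r [])) := by
    intro B r hrmem
    rw [PySem.List.mem_pyRange_one] at hrmem
    exact inner_commute (b:Int) _ B r (by omega)
  refine Eq.trans (PySem.List.foldl_congr_mem _ _ _ _ hcongr) ?_
  rw [outer_mapIdx (fun row => (PySem.List.pyRange (c0:Int) ((c0:Int) + (b:Int)) 1).foldl
      (fun row c => PySem.List.pySetD row c (b:Int)) row) b r0 grid hr]
  apply List.ext_getElem (by simp)
  intro j hj hj2
  rw [List.getElem_mapIdx, List.getElem_mapIdx]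
  by_cases hcond : r0 ≤ j ∧ j < r0 + b
  · rw [if_pos hcond, if_pos hcond,
      rowfold_splice (b:Int) b c0 _ (hc _ (List.getElem_mem _))]
  · rw [if_neg hcond, if_neg hcond]
theorem search_eq (n : Nat) (grid : List (List Int)) (block : Int) (hinv : GridInv n grid)
    (hb : 1 ≤ block) (hbn : block ≤ (n : Int)) :
    (PySem.List.pyRange 0 (PySem.List.len grid) 1).findSome? (fun row =>
        (PySem.List.pyRange 0 (PySem.List.len grid) 1).findSome? (fun col =>
          if isSpaceFree grid row col block then some (row, col) else none))
      = (findPos (vruns block (grid.map (fun row => zrow (row.take n)))) n block.toNat block).map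
          (fun p => ((p.1 : Int), (p.2 : Int))) := by
  obtain ⟨hlen, hrows⟩ := hinv
  have hrows' : ∀ row ∈ grid, grid.length ≤ row.length := by rw [hlen]; exact hrows
  set b := block.toNat with hbdef
  have hbt : (b : Int) = block := Int.toNat_of_nonneg (by omega)
  have hb1 : 1 ≤ b := by omega
  have hbn' : b ≤ n := by omega
  have hlen' : PySem.List.len grid = (n : Int) := by simp [PySem.List.len_eq, hlen]
  have hsplit : List.range n
      = List.range (n - b + 1) ++ (List.range (b - 1)).map (fun x => (n - b + 1) + x) := by
    rw [← List.range_add]; congr 1; omega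
  rw [hlen', PySem.List.pyRange_zero_nat, List.findSome?_map]
  unfold findPos
  rw [map_findSome?]
  set V := vruns block (grid.map (fun row => zrow (row.take n))) with hV
  set g : Nat → Option (Int × Int) := fun r =>
    if r < n - b + 1 then
      ((List.range (n - b + 1)).findSome? (fun c =>
        if block ≤ ((V.getD r []).getD c 0) then some (r, c) else none)).map
          (fun p => ((p.1 : Int), (p.2 : Int)))
    else none with hg
  have hpoint : ∀ r ∈ List.range n,
      ((fun row => (List.map (fun k : Nat => (k : Int)) (List.range n)).findSome? (fun col =>
          if isSpaceFree grid row col block then some (row, col) else none)) ∘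
        (fun k : Nat => (k : Int))) r = g r := by
    intro r hrmem
    have hrn : r < n := List.mem_range.mp hrmem
    simp only [Function.comp_apply, hg]
    by_cases hr : r < n - b + 1
    · rw [if_pos hr, List.findSome?_map, map_findSome?, hsplit, List.findSome?_append]
      have htail : ((List.range (b - 1)).map (fun x => (n - b + 1) + x)).findSome? ((fun col =>
          if isSpaceFree grid (r : Int) col block then some ((r : Int), col) else none) ∘
            (fun k : Nat => (k : Int))) = none := by
        rw [List.findSome?_eq_none_iff]
        intro c hc
        rcases List.mem_map.mp hc with ⟨x, hx, hxc⟩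
        simp only [List.mem_range] at hx
        simp only [Function.comp_apply]
        rw [if_neg]
        intro hfree
        have := (isSpaceFree_iff grid block hb hrows' r c).mp hfree
        omega
      rw [htail, Option.or_none]
      apply findSome?_congr_mem
      intro c hc
      simp only [List.mem_range] at hc
      simp only [Function.comp_apply]
      have hiff : (isSpaceFree grid (r : Int) (c : Int) block = true) ↔
          block ≤ ((V.getD r []).getD c 0) := by
        rw [isSpaceFree_iff grid block hb hrows' r c,
          free_iff_V n grid block ⟨hlen, hrows⟩ hb hbn r c (by omega) (by omega)]
        constructor
        · exact fun h => h.2.2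
        · exact fun h => ⟨by omega, by omega, h⟩
      by_cases hfree : isSpaceFree grid (r : Int) (c : Int) block = true
      · rw [if_pos hfree, if_pos (hiff.mp hfree)]
        rfl
      · rw [if_neg hfree, if_neg (fun hV2 => hfree (hiff.mpr hV2))]
        rfl
    · rw [if_neg hr, List.findSome?_eq_none_iff]
      intro col hcol
      rcases List.mem_map.mp hcol with ⟨x, hx, hxc⟩
      subst hxc
      rw [if_neg]
      intro hfree
      have := (isSpaceFree_iff grid block hb hrows' r x).mp hfree
      omega
  rw [findSome?_congr_mem _ _ g hpoint, hsplit, List.findSome?_append]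
  have htail2 : ((List.range (b - 1)).map (fun x => (n - b + 1) + x)).findSome? g = none := by
    rw [List.findSome?_eq_none_iff]
    intro r hrmem
    rcases List.mem_map.mp hrmem with ⟨x, hx, hxr⟩
    simp only [List.mem_range] at hx
    rw [hg]
    simp only
    rw [if_neg (by omega)]
  rw [htail2, Option.or_none]
  apply findSome?_congr_mem
  intro r hrmem
  have hr : r < n - b + 1 := List.mem_range.mp hrmem
  rw [hg]
  simp only
  rw [if_pos hr]
theorem findPos_bounds (V : List (List Int)) (n b : Nat) (block : Int) (r0 c0 : Nat)
    (h : findPos V n b block = some (r0, c0)) : r0 ≤ n - b ∧ c0 ≤ n - b := by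
  unfold findPos at h
  rcases List.exists_of_findSome?_eq_some h with ⟨r, hrmem, hr⟩
  rcases List.exists_of_findSome?_eq_some hr with ⟨c, hcmem, hc⟩
  have hrn := List.mem_range.mp hrmem
  have hcn := List.mem_range.mp hcmem
  by_cases hcond : block ≤ (V.getD r []).getD c 0
  · rw [if_pos hcond] at hc
    simp only [Option.some.injEq, Prod.mk.injEq] at hc
    omega
  · rw [if_neg hcond] at hc
    exact absurd hc (by simp)
theorem altStep_eq_match (n : Nat) (grid : List (List Int)) (block : Int)
    (h : ¬(block < 1 ∨ (n : Int) < block)) :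
    altStep n grid block =
      match findPos (vruns block (grid.map (fun row => zrow (row.take n)))) n block.toNat block with
      | none => grid
      | some (r0, c0) =>
          grid.mapIdx (fun r row =>
            if r0 ≤ r ∧ r < r0 + block.toNat then
              row.take c0 ++ List.replicate block.toNat block ++ row.drop (c0 + block.toNat)
            else row) := by
  unfold altStep
  rw [if_neg h]
theorem step_eq (n : Nat) (grid : List (List Int)) (block : Int) (hinv : GridInv n grid) :
    (tryPacker grid block).2 = altStep n grid block := by
  by_cases hskip : block < 1 ∨ (n : Int) < block
  · have hskip' : block ≤ 0 ∨ (grid.length : Int) < block := by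
      rcases hskip with h | h
      · exact Or.inl (by omega)
      · exact Or.inr (by rw [hinv.1]; omega)
    rw [tryPacker_skip grid block hskip']
    unfold altStep
    rw [if_pos hskip]
  · have hskip2 := hskip
    push_neg at hskip2
    obtain ⟨hb, hbn⟩ := hskip2
    have hb1 : 1 ≤ block := by omega
    rw [altStep_eq_match n grid block hskip]
    unfold tryPacker
    rw [search_eq n grid block hinv hb1 hbn]
    cases hfp : findPos (vruns block (grid.map (fun row => zrow (row.take n)))) n block.toNat block with
    | none => simp only [Option.map_none]
    | some p =>
        obtain ⟨r0, c0⟩ := p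
        simp only [Option.map_some]
        have hbounds := findPos_bounds _ _ _ _ _ _ hfp
        have hbnat : block.toNat ≤ n := by omega
        rw [placeBlock_eq block block.toNat (Int.toNat_of_nonneg (by omega)) grid r0 c0
          (by rw [hinv.1]; omega) (fun row hrow => by have := hinv.2 row hrow; omega)]
theorem altStep_inv (n : Nat) (grid : List (List Int)) (block : Int) (hinv : GridInv n grid) :
    GridInv n (altStep n grid block) := by
  by_cases hskip : block < 1 ∨ (n : Int) < block
  · unfold altStep
    rw [if_pos hskip]
    exact hinv
  · rw [altStep_eq_match n grid block hskip]
    cases hfp : findPos (vruns block (grid.map (fun row => zrow (row.take n)))) n block.toNat block with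
    | none => exact hinv
    | some p =>
        obtain ⟨r0, c0⟩ := p
        have hbounds := findPos_bounds _ _ _ _ _ _ hfp
        have hskip2 := hskip
        push_neg at hskip2
        have hbn : block.toNat ≤ n := by omega
        constructor
        · simp [hinv.1]
        · intro row hrow
          rcases List.mem_iff_getElem.mp hrow with ⟨j, hj, hrow'⟩
          rw [List.getElem_mapIdx] at hrow'
          rw [← hrow']
          have hjlen : n ≤ (grid[j]'(by simpa using hj)).length := hinv.2 _ (List.getElem_mem _)
          split
          · simp only [List.length_append, List.length_take, List.length_replicate,
              List.length_drop]
            omega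
          · exact hjlen

theorem fold_eq (n : Nat) (blocks : List Int) (grid : List (List Int)) (u : List Int)
    (hinv : GridInv n grid) :
    (blocks.foldl (fun (st : List (List Int) × List Int) block =>
        let r := tryPacker st.1 block
        if r.1 then (r.2, st.2) else (r.2, st.2 ++ [block])) (grid, u)).1 =
      blocks.foldl (altStep n) grid := by
  induction blocks generalizing grid u with
  | nil => rfl
  | cons b bs ih =>
      have hstep := step_eq n grid b hinv
      have hinv' : GridInv n (altStep n grid b) := altStep_inv n grid b hinv
      simp only [List.foldl_cons]
      by_cases hok : (tryPacker grid b).1 = true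
      · simp only [hok, if_pos, hstep]
        exact ih _ _ hinv'
      · simp only [eq_false_of_ne_true hok, Bool.false_eq_true, if_false, hstep]
        exact ih _ _ hinv'

theorem fold_skip (blocks : List Int) (grid : List (List Int)) (u : List Int)
    (h : ∀ b ∈ blocks, b ≤ 0 ∨ (grid.length : Int) < b) :
    (blocks.foldl (fun (st : List (List Int) × List Int) block =>
        let r := tryPacker st.1 block
        if r.1 then (r.2, st.2) else (r.2, st.2 ++ [block])) (grid, u)).1 = grid ∧
      blocks.foldl (altStep grid.length) grid = grid := by
  induction blocks generalizing u with
  | nil => exact ⟨rfl, rfl⟩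
  | cons b bs ih =>
      have hb := h b (by simp)
      have hstep : (tryPacker grid b).2 = grid := tryPacker_skip grid b hb
      have halt : altStep grid.length grid b = grid := by
        unfold altStep
        rw [if_pos (by rcases hb with h' | h'; exact Or.inl (by omega); exact Or.inr (by omega))]
      have hbs : ∀ x ∈ bs, x ≤ 0 ∨ (grid.length : Int) < x := fun x hx => h x (by simp [hx])
      simp only [List.foldl_cons, halt]
      constructor
      · by_cases hok : (tryPacker grid b).1 = true
        · simp only [hok, if_pos, hstep]
          exact (ih u hbs).1
        · simp only [eq_false_of_ne_true hok, Bool.false_eq_true, if_false, hstep]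
          exact (ih (u ++ [b]) hbs).1
      · exact (ih u hbs).2

-- ===== VERDICT (by name: the statement is the Claim_ definition above) =====
theorem packer_spec : Claim_equal_packer := by
  intro Bin blockList _hdom hpre
  unfold Spec_packer packer packer_alt
  rcases hpre with hrows | hblocks
  · exact fold_eq Bin.length blockList Bin [] ⟨rfl, hrows⟩
  · rcases fold_skip blockList Bin [] hblocks with ⟨h1, h2⟩
    rw [h1, h2]
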